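-- pv_equiv track=rewrite | github.com/plasmax/DVD | test_script/test_exr_sequence_chunked.py | get_trimmed_window_plan
-- ===== SOURCE A (Python) =====
-- def get_window_index(T, window_size, overlap):
--     if T <= window_size:
--         return [(0, T)]
--     res = [(0, window_size)]
--     start = window_size - overlap
--     while start < T:
--         end = start + window_size
--         if end < T:
--             res.append((start, end))
--             start += window_size - overlap
--         else:
--             start = max(0, T - window_size)
--             res.append((start, T))
--             break
--     return res
--
-- def get_trimmed_window_plan(T, window_size, overlap, trim_frames):
--     """Plans fixed-length inference windows with warmup trimmed from later windows."""
--     if trim_frames == 0: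
--         inference_windows = get_window_index(T, window_size, overlap)
--         output_windows = inference_windows.copy()
--         return inference_windows, output_windows
--
--     usable_frames = window_size - trim_frames
--     stride = usable_frames - overlap
--     if usable_frames <= 0:
--         raise ValueError(
--             f"trim_frames must be smaller than window_size, got trim_frames={trim_frames}, "
--             f"window_size={window_size}"
--         )
--     if stride <= 0:
--         raise ValueError(
--             "overlap must be smaller than the usable frames after trimming, got "
--             f"overlap={overlap}, usable_frames={usable_frames}"
--         )
--
--     if T <= window_size:
--         return [(0, T)], [(0, T)]
--
--     inference_windows = [(0, window_size)]
--     output_windows = [(0, window_size)]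
--
--     start = stride
--     while start < T:
--         end = start + window_size
--         if end < T:
--             inference_windows.append((start, end))
--             output_windows.append((start + trim_frames, end))
--             start += stride
--         else:
--             start = max(0, T - window_size)
--             if inference_windows[-1][0] != start:
--                 inference_windows.append((start, T))
--                 output_windows.append((start + trim_frames, T))
--             break
--
--     return inference_windows, output_windows
-- ===== SOURCE B (Python) =====
-- def get_trimmed_window_plan(T, window_size, overlap, trim_frames):
--     """Plans fixed-length inference windows with warmup trimmed from later windows."""
--     usable_frames = window_size - trim_frames
--     stride = usable_frames - overlap
--     if trim_frames != 0:
--         if usable_frames <= 0: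
--             raise ValueError(
--                 f"trim_frames must be smaller than window_size, got trim_frames={trim_frames}, "
--                 f"window_size={window_size}"
--             )
--         if stride <= 0:
--             raise ValueError(
--                 "overlap must be smaller than the usable frames after trimming, got "
--                 f"overlap={overlap}, usable_frames={usable_frames}"
--             )
--
--     if T <= window_size:
--         return [(0, T)], [(0, T)]
--
--     # k = first multiple count with k*stride >= T - window_size (>= 1 since T > window_size)
--     k = -((-(T - window_size)) // stride)
--     tail = [(i * stride, i * stride + window_size) for i in range(1, k)]
--     if k * stride < T:
--         tail.append((T - window_size, T))
--     inference_windows = [(0, window_size)] + tail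
--     output_windows = [(0, window_size)] + [(s + trim_frames, e) for s, e in tail]
--     return inference_windows, output_windows
-- ===== Notes on version B (the rewrite author's own statement) =====
-- stated objective: alternative
-- what changed: A's single interleaved while-loop (with break, clamp and a [-1]-dedup check, duplicated across the trim==0 helper and the main branch) is replaced by one closed-form step count k = ceil((T-window_size)/stride), a range comprehension producing the interior windows, a guarded final clamped window, and a separate second pass deriving the trimmed output windows from the inference windows.
import Mathlib
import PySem

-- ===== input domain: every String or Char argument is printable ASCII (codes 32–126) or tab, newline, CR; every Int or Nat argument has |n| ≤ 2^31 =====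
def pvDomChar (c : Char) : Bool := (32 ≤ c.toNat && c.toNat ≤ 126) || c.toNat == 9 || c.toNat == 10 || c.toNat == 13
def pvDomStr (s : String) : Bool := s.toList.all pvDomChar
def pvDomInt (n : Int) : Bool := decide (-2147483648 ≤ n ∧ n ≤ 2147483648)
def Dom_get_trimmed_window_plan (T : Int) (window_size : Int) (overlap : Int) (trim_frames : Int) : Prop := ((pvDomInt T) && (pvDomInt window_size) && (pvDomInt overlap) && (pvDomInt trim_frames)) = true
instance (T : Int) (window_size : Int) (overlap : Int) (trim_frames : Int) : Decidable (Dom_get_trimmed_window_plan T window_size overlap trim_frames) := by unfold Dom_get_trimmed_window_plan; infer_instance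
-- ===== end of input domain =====

-- B replaces A's interleaved while-loop by a closed-form step count k = ceil((T-ws)/stride),
-- a range comprehension for the interior windows and a second pass deriving the trimmed
-- output windows (objective: alternative decomposition, same cost).

-- ===== PORT A =====
-- the while-loop of get_window_index; fuel only makes the recursion total (Pre_ guarantees it suffices)
def gwiLoop (T window_size stride : Int) : Nat → Int → List (Int × Int) → List (Int × Int)
  | 0, _, res => res
  | fuel + 1, start, res =>
    if start < T then
      let e := start + window_size
      if e < T then gwiLoop T window_size stride fuel (start + stride) (res ++ [(start, e)])
      else res ++ [(max 0 (T - window_size), T)]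
    else res

def get_window_index (T window_size overlap : Int) : List (Int × Int) :=
  if T ≤ window_size then [(0, T)]
  else gwiLoop T window_size (window_size - overlap) ((T - window_size).toNat + 1)
        (window_size - overlap) [(0, window_size)]

-- the while-loop of the trim_frames ≠ 0 branch (with the [-1]-dedup check before the final append)
def planLoop (T window_size trim_frames stride : Int) :
    Nat → Int → List (Int × Int) → List (Int × Int) → (List (Int × Int)) × (List (Int × Int))
  | 0, _, inf, out => (inf, out)
  | fuel + 1, start, inf, out =>
    if start < T then
      let e := start + window_size
      if e < T then
        planLoop T window_size trim_frames stride fuel (start + stride)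
          (inf ++ [(start, e)]) (out ++ [(start + trim_frames, e)])
      else
        let s := max 0 (T - window_size)
        if (PySem.List.pyGet? inf (-1)).map Prod.fst ≠ some s then
          (inf ++ [(s, T)], out ++ [(s + trim_frames, T)])
        else (inf, out)
    else (inf, out)

def get_trimmed_window_plan (T : Int) (window_size : Int) (overlap : Int) (trim_frames : Int) : (List (Int × Int)) × (List (Int × Int)) :=
  if trim_frames = 0 then
    let iw := get_window_index T window_size overlap
    (iw, iw)
  else
    -- (the two ValueError raises are excluded by Pre_)
    let stride := window_size - trim_frames - overlap
    if T ≤ window_size then ([(0, T)], [(0, T)])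
    else planLoop T window_size trim_frames stride ((T - window_size).toNat + 1)
          stride [(0, window_size)] [(0, window_size)]

-- ===== PORT B =====
def get_trimmed_window_plan_alt (T : Int) (window_size : Int) (overlap : Int) (trim_frames : Int) : (List (Int × Int)) × (List (Int × Int)) :=
  let stride := window_size - trim_frames - overlap
  if T ≤ window_size then ([(0, T)], [(0, T)])
  else
    let k := -(PySem.Int.floordiv (-(T - window_size)) stride)   -- ceil((T-ws)/stride)
    let tail :=
      (PySem.List.pyRange 1 k 1).map (fun i => (i * stride, i * stride + window_size)) ++
        (if k * stride < T then [(T - window_size, T)] else [])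
    ([(0, window_size)] ++ tail,
     [(0, window_size)] ++ tail.map (fun p => (p.1 + trim_frames, p.2)))

-- ===== PRECONDITION & SPEC =====
-- Pre_ excludes (a) the two explicit ValueError raises (trim_frames ≠ 0 with non-positive
-- usable frames or stride), (b) trim_frames = 0 with overlap ≥ window_size < T, where A's
-- loop never terminates, and (c) non-positive window_size with window_size < T — outside the
-- planner's natural domain, where A's loop-guard/clamp interplay yields accidental truncated plans.
def Pre_get_trimmed_window_plan (T : Int) (window_size : Int) (overlap : Int) (trim_frames : Int) : Prop :=
  (trim_frames ≠ 0 → 0 < window_size - trim_frames ∧ 0 < window_size - trim_frames - overlap) ∧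
  (window_size < T → 0 < window_size ∧ (trim_frames = 0 → overlap < window_size))
instance (T : Int) (window_size : Int) (overlap : Int) (trim_frames : Int) : Decidable (Pre_get_trimmed_window_plan T window_size overlap trim_frames) := by unfold Pre_get_trimmed_window_plan; infer_instance

def pvWitness_get_trimmed_window_plan : Int × Int × Int × Int := (10, 4, 1, 1)

def Spec_get_trimmed_window_plan (T : Int) (window_size : Int) (overlap : Int) (trim_frames : Int) (out : (List (Int × Int)) × (List (Int × Int))) : Prop := out = get_trimmed_window_plan_alt T window_size overlap trim_frames
instance (T : Int) (window_size : Int) (overlap : Int) (trim_frames : Int) (out : (List (Int × Int)) × (List (Int × Int))) : Decidable (Spec_get_trimmed_window_plan T window_size overlap trim_frames out) := by unfold Spec_get_trimmed_window_plan; infer_instance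

-- ===== CLAIM (what is proved, stated in full; the proofs are below) =====
def Claim_equal_get_trimmed_window_plan : Prop := ∀ (T : Int) (window_size : Int) (overlap : Int) (trim_frames : Int), Dom_get_trimmed_window_plan T window_size overlap trim_frames → Pre_get_trimmed_window_plan T window_size overlap trim_frames → Spec_get_trimmed_window_plan T window_size overlap trim_frames (get_trimmed_window_plan T window_size overlap trim_frames)

-- ===== LEMMAS AND PROOFS =====

-- Shared facts about K := ceil((T-ws)/stride) when 0 < stride and ws < T.
lemma ceilK_spec (T ws stride : Int) (hs : 0 < stride) (hT : ws < T) :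
    let K := -(PySem.Int.floordiv (-(T - ws)) stride)
    1 ≤ K ∧ (K - 1) * stride < T - ws ∧ T - ws ≤ K * stride := by
  intro K
  have h := (PySem.Int.neg_floordiv_neg_eq_iff_of_pos (a := T - ws) (b := stride)
    (q := K) hs).mp rfl
  refine ⟨?_, h.1, h.2⟩
  by_contra hK
  have : K * stride ≤ 0 := mul_nonpos_of_nonpos_of_nonneg (by omega) (by omega)
  omega

lemma K_lt_of_min (K stride T ws : Int) (hs : 0 < stride) (hT : ws < T)
    (hKm : (K - 1) * stride < T - ws) (hK1 : 1 ≤ K) : K - 1 < T - ws := by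
  nlinarith

-- Minimality: every j strictly below K gives an interior window.
lemma interior_lt (K stride T ws j : Int) (hs : 0 < stride)
    (hKm : (K - 1) * stride < T - ws) (hj1 : 1 ≤ j) (hjK : j < K) :
    j * stride < T - ws := by
  have : j * stride ≤ (K - 1) * stride := by
    apply mul_le_mul_of_nonneg_right (by omega) (by omega)
  omega

-- The get_window_index loop, run from start = j*stride, produces the interior windows
-- for j..K-1 and then the clamped final window exactly when K*stride < T.
lemma gwiLoop_run (T ws stride K : Int) (hs : 0 < stride) (hT : ws < T) (hws : 0 < ws)
    (hK1 : 1 ≤ K) (hKhi : T - ws ≤ K * stride) (hKm : (K - 1) * stride < T - ws) :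
    ∀ (fuel : Nat) (j : Int) (P : List (Int × Int)), 1 ≤ j → j ≤ K → K - j < (fuel : Int) →
      gwiLoop T ws stride fuel (j * stride) P =
        P ++ (PySem.List.pyRange j K 1).map (fun i => (i * stride, i * stride + ws)) ++
          (if K * stride < T then [(T - ws, T)] else []) := by
  intro fuel
  induction fuel with
  | zero => intro j P _ _ hf; simp at hf; omega
  | succ f ih =>
    intro j P hj1 hjK hf
    rcases lt_or_eq_of_le hjK with hjlt | hje
    · -- interior step
      have hint : j * stride < T - ws := interior_lt K stride T ws j hs hKm hj1 hjlt
      have h1 : j * stride < T := by omega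
      have h2 : j * stride + ws < T := by omega
      rw [gwiLoop, if_pos h1]
      simp only [if_pos h2]
      have harg : j * stride + stride = (j + 1) * stride := by ring
      have hf' : K - (j + 1) < (f : Int) := by push_cast at hf; omega
      have hI := ih (j + 1) (P ++ [(j * stride, j * stride + ws)]) (by omega) hjlt hf'
      rw [harg, hI, PySem.List.pyRange_one_cons hjlt]
      simp
    · -- j = K : break or fall out of the loop
      subst hje
      rw [gwiLoop]
      have hre : PySem.List.pyRange j j = [] := by simp
      rw [hre]
      by_cases hKT : j * stride < T
      · rw [if_pos hKT]
        have hnot : ¬ (j * stride + ws < T) := by omega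
        simp only [if_neg hnot, if_pos hKT]
        have : max 0 (T - ws) = T - ws := by omega
        simp [this]
      · rw [if_neg hKT, if_neg hKT]
        simp

-- The planLoop of the trim_frames ≠ 0 branch: same interior windows, a trimmed copy on
-- the output side; the [-1]-dedup check never fires because every accumulated start is < T - ws.
lemma planLoop_run (T ws trim stride K : Int) (hs : 0 < stride) (hT : ws < T) (hws : 0 < ws)
    (hK1 : 1 ≤ K) (hKhi : T - ws ≤ K * stride) (hKm : (K - 1) * stride < T - ws) :
    ∀ (fuel : Nat) (j : Int) (P Q : List (Int × Int)), 1 ≤ j → j ≤ K → K - j < (fuel : Int) →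
      P ≠ [] → (∀ x ∈ P, x.1 < T - ws) →
      planLoop T ws trim stride fuel (j * stride) P Q =
        (P ++ (PySem.List.pyRange j K 1).map (fun i => (i * stride, i * stride + ws)) ++
           (if K * stride < T then [(T - ws, T)] else []),
         Q ++ (PySem.List.pyRange j K 1).map (fun i => (i * stride + trim, i * stride + ws)) ++
           (if K * stride < T then [(T - ws + trim, T)] else [])) := by
  intro fuel
  induction fuel with
  | zero => intro j P Q _ _ hf; simp at hf; omega
  | succ f ih =>
    intro j P Q hj1 hjK hf hPne hPlt
    rcases lt_or_eq_of_le hjK with hjlt | hje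
    · have hint : j * stride < T - ws := interior_lt K stride T ws j hs hKm hj1 hjlt
      have h1 : j * stride < T := by omega
      have h2 : j * stride + ws < T := by omega
      rw [planLoop, if_pos h1]
      simp only [if_pos h2]
      have harg : j * stride + stride = (j + 1) * stride := by ring
      have hf' : K - (j + 1) < (f : Int) := by push_cast at hf; omega
      have hI := ih (j + 1) (P ++ [(j * stride, j * stride + ws)])
        (Q ++ [(j * stride + trim, j * stride + ws)]) (by omega) hjlt hf'
        (by simp)
        (by intro x hx; rcases List.mem_append.mp hx with h | h
            · exact hPlt x h
            · simp at h; simp [h]; exact hint)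
      rw [harg, hI, PySem.List.pyRange_one_cons hjlt]
      simp
    · subst hje
      rw [planLoop]
      have hre : PySem.List.pyRange j j = [] := by simp
      rw [hre]
      by_cases hKT : j * stride < T
      · rw [if_pos hKT]
        have hnot : ¬ (j * stride + ws < T) := by omega
        simp only [if_neg hnot, if_pos hKT]
        have hmax : max 0 (T - ws) = T - ws := by omega
        -- the dedup check: last accumulated start < T - ws, hence ≠ T - ws
        have hlast : (PySem.List.pyGet? P (-1)).map Prod.fst ≠ some (max 0 (T - ws)) := by
          rw [PySem.List.pyGet?_neg_one, hmax]
          rcases List.getLast?_eq_getLast_of_ne_nil hPne with h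
          rw [h]
          have := hPlt (P.getLast hPne) (List.getLast_mem hPne)
          simp; omega
        rw [if_pos hlast]
        simp [hmax]
      · rw [if_neg hKT, if_neg hKT]
        simp
        omega

-- ===== VERDICT (by name: the statement is the Claim_ definition above) =====
theorem get_trimmed_window_plan_spec : Claim_equal_get_trimmed_window_plan := by
  intro T ws ov tr _ hpre
  unfold Spec_get_trimmed_window_plan
  obtain ⟨hraise, hmain⟩ := hpre
  by_cases hT : T ≤ ws
  · -- both return ([(0,T)], [(0,T)])
    by_cases htr : tr = 0 <;>
      simp [get_trimmed_window_plan, get_trimmed_window_plan_alt, get_window_index, htr, hT]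
  · replace hT : ws < T := by omega
    obtain ⟨hws, hov⟩ := hmain hT
    by_cases htr : tr = 0
    · -- trim_frames = 0 : A goes through get_window_index
      subst htr
      have hs : 0 < ws - 0 - ov := by have := hov rfl; omega
      obtain ⟨hK1, hKm, hKhi⟩ := ceilK_spec T ws (ws - 0 - ov) hs hT
      set K := -(PySem.Int.floordiv (-(T - ws)) (ws - 0 - ov)) with hKdef
      have hfuel : K - 1 < ((T - ws).toNat + 1 : Int) := by
        have := K_lt_of_min K (ws - 0 - ov) T ws hs hT hKm hK1; omega
      have hrun := gwiLoop_run T ws (ws - 0 - ov) K hs hT hws hK1 hKhi hKm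
        ((T - ws).toNat + 1) 1 [(0, ws)] le_rfl hK1 (by push_cast; omega)
      simp only [one_mul] at hrun
      have hstride : ws - ov = ws - 0 - ov := by ring
      simp only [get_trimmed_window_plan, get_window_index,
        if_neg (by omega : ¬ T ≤ ws), hstride, hrun]
      simp only [get_trimmed_window_plan_alt, if_neg (by omega : ¬ T ≤ ws)]
      rw [← hKdef]
      simp [List.map_append]
    · -- trim_frames ≠ 0 : A goes through planLoop
      have hs : 0 < ws - tr - ov := (hraise htr).2
      obtain ⟨hK1, hKm, hKhi⟩ := ceilK_spec T ws (ws - tr - ov) hs hT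
      set K := -(PySem.Int.floordiv (-(T - ws)) (ws - tr - ov)) with hKdef
      have hfuel : K - 1 < ((T - ws).toNat + 1 : Int) := by
        have := K_lt_of_min K (ws - tr - ov) T ws hs hT hKm hK1; omega
      have hrun := planLoop_run T ws tr (ws - tr - ov) K hs hT hws hK1 hKhi hKm
        ((T - ws).toNat + 1) 1 [(0, ws)] [(0, ws)] le_rfl hK1 (by push_cast; omega)
        (by simp) (by intro x hx; simp at hx; simp [hx]; omega)
      simp only [one_mul] at hrun
      simp only [get_trimmed_window_plan, if_neg htr, if_neg (by omega : ¬ T ≤ ws), hrun]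
      simp only [get_trimmed_window_plan_alt, if_neg (by omega : ¬ T ≤ ws)]
      rw [← hKdef]
      simp [List.map_append, apply_ite (List.map (fun p : Int × Int => (p.1 + tr, p.2)))]
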